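-- pv_equiv track=rewrite | github.com/nikhilkr7/Astuto-coding-test | Folder/q3.py | find_overloaded_users
-- ===== SOURCE A (Python) =====
-- def find_overloaded_users(events):
--     """
--     Identify users with 3+ events within any 10-second window.
--     """
--     from collections import defaultdict
--
--     user_events = defaultdict(list)
--
--     # Group events by user
--     for user, ts in events:
--         user_events[user].append(ts)
--
--     overloaded = set()
--
--     # Check each user's timestamps
--     for user, timestamps in user_events.items():
--         timestamps.sort()
--         n = len(timestamps)
--
--         # Sliding window: i = start, j = end
--         i = 0
--         for j in range(n):
--             # Shrink window until it fits within < 10 seconds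
--             while timestamps[j] - timestamps[i] >= 10:
--                 i += 1
--             # Check count: j - i + 1 events in window
--             if (j - i + 1) >= 3:
--                 overloaded.add(user)
--                 break
--
--     return overloaded
-- ===== SOURCE B (Python) =====
-- def _has_burst(ts):
--     ts = sorted(ts)
--     return any(ts[k + 2] - ts[k] < 10 for k in range(len(ts) - 2))
--
--
-- def find_overloaded_users(events):
--     groups = {}
--     for user, ts in events:
--         groups.setdefault(user, []).append(ts)
--     return {user for user, ts_list in groups.items() if _has_burst(ts_list)}
-- ===== Notes on version B (the rewrite author's own statement) =====
-- stated objective: simpler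
-- what changed: The stateful two-pointer sliding window (shrink index i carried across iterations, early break) is replaced by a stateless consecutive-triple scan: after sorting, a user is overloaded iff some ts[k+2]-ts[k] < 10.
import Mathlib
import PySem

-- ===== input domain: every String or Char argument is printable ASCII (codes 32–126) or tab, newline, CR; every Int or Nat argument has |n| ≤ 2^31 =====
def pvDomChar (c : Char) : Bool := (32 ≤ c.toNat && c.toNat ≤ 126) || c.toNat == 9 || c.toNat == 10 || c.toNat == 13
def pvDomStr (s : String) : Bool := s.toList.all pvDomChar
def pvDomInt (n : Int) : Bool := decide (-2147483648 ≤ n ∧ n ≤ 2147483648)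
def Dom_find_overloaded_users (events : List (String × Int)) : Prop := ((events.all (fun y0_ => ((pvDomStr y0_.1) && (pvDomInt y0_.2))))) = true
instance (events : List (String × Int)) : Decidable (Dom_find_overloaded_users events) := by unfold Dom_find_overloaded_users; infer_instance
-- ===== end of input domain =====

-- B replaces A's stateful two-pointer sliding window by a stateless check of consecutive
-- sorted triples (objective: simpler; same asymptotic cost, the sort dominates).

-- ===== PORT A =====
-- 'while timestamps[j] - timestamps[i] >= 10: i += 1'; the 'i < j' guard only makes the
-- recursion total — on the sorted lists A feeds it the condition is false at i = j anyway.
def pvShrink (t : List Int) (j i : Nat) : Nat :=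
  if h : i < j ∧ 10 ≤ PySem.List.pyGetD t (j : Int) 0 - PySem.List.pyGetD t (i : Int) 0 then
    pvShrink t j (i + 1)
  else i
termination_by j - i
decreasing_by omega

-- 'for j in range(n): … if (j - i + 1) >= 3: …; break'
def pvALoop (t : List Int) (n j i : Nat) : Bool :=
  if j < n then
    let i' := pvShrink t j i
    if 3 ≤ j - i' + 1 then true else pvALoop t n (j + 1) i'
  else false
termination_by n - j

def find_overloaded_users (events : List (String × Int)) : List String :=
  let userEvents := events.foldl (fun d p => d.modify p.1 [] (· ++ [p.2])) PySem.Dict.empty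
  userEvents.items.foldl
    (fun overloaded p =>
      let timestamps := PySem.List.sorted p.2 (fun x => x) false
      if pvALoop timestamps timestamps.length 0 0 then PySem.Set.add overloaded p.1
      else overloaded)
    PySem.Set.empty

-- ===== PORT B =====
-- any(ts[k+2] - ts[k] < 10 for k in range(len(ts) - 2)) on the sorted list
def pvHasBurst (ts : List Int) : Bool :=
  let t := PySem.List.sorted ts (fun x => x) false
  (PySem.List.pyRange 0 ((t.length : Int) - 2) 1).any
    (fun k => PySem.List.pyGetD t (k + 2) 0 - PySem.List.pyGetD t k 0 < 10)

def find_overloaded_users_alt (events : List (String × Int)) : List String :=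
  let groups := events.foldl (fun d p => d.modify p.1 [] (· ++ [p.2])) PySem.Dict.empty
  PySem.Set.ofList ((groups.items.filter (fun p => pvHasBurst p.2)).map (·.1))

-- ===== PRECONDITION & SPEC =====
def Spec_find_overloaded_users (events : List (String × Int)) (out : List String) : Prop := out = find_overloaded_users_alt events
instance (events : List (String × Int)) (out : List String) : Decidable (Spec_find_overloaded_users events out) := by unfold Spec_find_overloaded_users; infer_instance

-- ===== CLAIM (what is proved, stated in full; the proofs are below) =====
def Claim_equal_find_overloaded_users : Prop := ∀ (events : List (String × Int)), Dom_find_overloaded_users events → Spec_find_overloaded_users events (find_overloaded_users events)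

-- ===== LEMMAS AND PROOFS =====

theorem pvGetD_cast (t : List Int) (k : Nat) :
    PySem.List.pyGetD t (k : Int) 0 = t.getD k 0 := by simp

theorem pvMono (t : List Int) (h : t.Pairwise (· ≤ ·)) (i j : Nat) (hij : i ≤ j)
    (hj : j < t.length) : t.getD i 0 ≤ t.getD j 0 := by
  rcases Nat.eq_or_lt_of_le hij with rfl | hlt
  · rfl
  · have := List.pairwise_iff_getElem.mp h i j (by omega) hj hlt
    simp [Nat.lt_of_le_of_lt hij hj, hj, this]

theorem pvShrink_ge (t : List Int) (j i : Nat) : i ≤ pvShrink t j i := by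
  unfold pvShrink
  split
  · have := pvShrink_ge t j (i + 1); omega
  · exact le_rfl
termination_by j - i
decreasing_by omega

theorem pvShrink_le (t : List Int) (j i : Nat) (h : i ≤ j) : pvShrink t j i ≤ j := by
  unfold pvShrink
  split
  · exact pvShrink_le t j (i + 1) (by omega)
  · exact h
termination_by j - i
decreasing_by omega

theorem pvShrink_lt10 (t : List Int) (j i : Nat) (h : i ≤ j) :
    t.getD j 0 - t.getD (pvShrink t j i) 0 < 10 := by
  unfold pvShrink
  split
  · exact pvShrink_lt10 t j (i + 1) (by omega)
  · rename_i hneg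
    rcases Nat.eq_or_lt_of_le h with rfl | hlt
    · omega
    · rw [pvGetD_cast, pvGetD_cast] at hneg; omega
termination_by j - i
decreasing_by omega

theorem pvShrink_min (t : List Int) (j i : Nat) :
    ∀ m, i ≤ m → m < pvShrink t j i → 10 ≤ t.getD j 0 - t.getD m 0 := by
  intro m him hm
  unfold pvShrink at hm
  split at hm
  · rename_i hcond
    rcases Nat.eq_or_lt_of_le him with rfl | hlt
    · rw [pvGetD_cast, pvGetD_cast] at hcond; omega
    · exact pvShrink_min t j (i + 1) m hlt hm
  · omega
termination_by j - i
decreasing_by omega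

theorem pvALoop_iff (t : List Int) (hs : t.Pairwise (· ≤ ·)) (n j i : Nat)
    (hn : n = t.length) (hij : i ≤ j)
    (inv : ∀ m, m < i → j < n → 10 ≤ t.getD j 0 - t.getD m 0) :
    pvALoop t n j i = true ↔
      ∃ k, k + 2 < n ∧ j ≤ k + 2 ∧ t.getD (k + 2) 0 - t.getD k 0 < 10 := by
  by_cases hlt : j < n
  · have hsle : pvShrink t j i ≤ j := pvShrink_le t j i hij
    have hsge : i ≤ pvShrink t j i := pvShrink_ge t j i
    have hlt10 : t.getD j 0 - t.getD (pvShrink t j i) 0 < 10 := pvShrink_lt10 t j i hij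
    have hall : ∀ m, m < pvShrink t j i → 10 ≤ t.getD j 0 - t.getD m 0 := by
      intro m hm
      by_cases hmi : m < i
      · exact inv m hmi hlt
      · exact pvShrink_min t j i m (by omega) hm
    rw [pvALoop]
    simp only [hlt, if_pos]
    by_cases hwin : 3 ≤ j - pvShrink t j i + 1
    · simp only [hwin, if_pos, true_iff]
      refine ⟨j - 2, by omega, by omega, ?_⟩
      have h1 : t.getD (pvShrink t j i) 0 ≤ t.getD (j - 2) 0 :=
        pvMono t hs _ _ (by omega) (by omega)
      have h2 : (j - 2) + 2 = j := by omega
      rw [h2]; omega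
    · simp only [hwin, if_neg, not_false_iff]
      have ih := pvALoop_iff t hs n (j + 1) (pvShrink t j i) hn (by omega)
        (by
          intro m hm hj1
          have h1 := hall m hm
          have h2 : t.getD j 0 ≤ t.getD (j + 1) 0 := pvMono t hs _ _ (by omega) (by omega)
          omega)
      rw [ih]
      constructor
      · rintro ⟨k, h1, h2, h3⟩; exact ⟨k, h1, by omega, h3⟩
      · rintro ⟨k, h1, h2, h3⟩
        refine ⟨k, h1, ?_, h3⟩
        rcases Nat.lt_or_ge (k + 2) (j + 1) with hk | hk
        · have hkj : k + 2 = j := by omega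
          have hks : pvShrink t j i ≤ k := by
            by_contra hc
            have := hall k (by omega)
            rw [hkj] at h3; omega
          omega
        · exact hk
  · rw [pvALoop]
    simp only [hlt]
    constructor
    · intro h; exact absurd h (by simp)
    · rintro ⟨k, h1, h2, _⟩; omega
termination_by n - j
decreasing_by omega

theorem pvHasBurst_iff (ts : List Int) :
    pvHasBurst ts = true ↔
      ∃ k, k + 2 < (PySem.List.sorted ts (fun x => x) false).length ∧
        (PySem.List.sorted ts (fun x => x) false).getD (k + 2) 0 -
          (PySem.List.sorted ts (fun x => x) false).getD k 0 < 10 := by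
  unfold pvHasBurst
  rw [List.any_eq_true]
  constructor
  · rintro ⟨x, hx, hp⟩
    rw [PySem.List.mem_pyRange_one] at hx
    obtain ⟨k, rfl⟩ : ∃ m : Nat, (m : Int) = x := ⟨x.toNat, by omega⟩
    refine ⟨k, by omega, ?_⟩
    rw [show ((k : Nat) : Int) + 2 = ((k + 2 : Nat) : Int) by push_cast; ring,
      pvGetD_cast, pvGetD_cast] at hp
    exact of_decide_eq_true hp
  · rintro ⟨k, hk, hp⟩
    refine ⟨(k : Int), ?_, ?_⟩
    · rw [PySem.List.mem_pyRange_one]; omega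
    · rw [show ((k : Nat) : Int) + 2 = ((k + 2 : Nat) : Int) by push_cast; ring,
        pvGetD_cast, pvGetD_cast]
      exact decide_eq_true hp

theorem pvPerUser (ts : List Int) :
    pvALoop (PySem.List.sorted ts (fun x => x) false)
      (PySem.List.sorted ts (fun x => x) false).length 0 0 = pvHasBurst ts := by
  rw [Bool.eq_iff_iff]
  have hs : (PySem.List.sorted ts (fun x => x) false).Pairwise (· ≤ ·) := by
    simpa using PySem.List.sorted_pairwise ts (fun x => x)
  rw [pvALoop_iff _ hs _ 0 0 rfl le_rfl (by omega), pvHasBurst_iff]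
  constructor
  · rintro ⟨k, h1, _, h3⟩; exact ⟨k, h1, h3⟩
  · rintro ⟨k, h1, h3⟩; exact ⟨k, h1, by omega, h3⟩

theorem pvFoldl_add_eq_filter (pred : String × List Int → Bool) :
    ∀ (items : List (String × List Int)) (acc : List String),
      (items.map (·.1)).Nodup → (∀ p ∈ items, p.1 ∉ acc) →
      items.foldl (fun ov p => if pred p then PySem.Set.add ov p.1 else ov) acc
        = acc ++ (items.filter pred).map (·.1) := by
  intro items
  induction items with
  | nil => intro acc _ _; simp
  | cons p rest ih =>
    intro acc hnd hdisj
    simp only [List.map_cons, List.nodup_cons] at hnd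
    have hmem : p.1 ∉ acc := hdisj p (by simp)
    by_cases hp : pred p
    · have hadd : PySem.Set.add acc p.1 = acc ++ [p.1] := by
        simp [PySem.Set.add, List.contains_eq_mem, hmem]
      rw [List.foldl_cons, if_pos hp, hadd]
      rw [ih (acc ++ [p.1]) hnd.2
        (by
          intro q hq
          simp only [List.mem_append, List.mem_singleton]
          rintro (hc | hc)
          · exact hdisj q (List.mem_cons_of_mem _ hq) hc
          · exact hnd.1 (hc ▸ List.mem_map_of_mem hq))]
      simp [hp]
    · rw [List.foldl_cons, if_neg hp]
      rw [ih acc hnd.2 (fun q hq => hdisj q (List.mem_cons_of_mem _ hq))]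
      simp [hp]

theorem pvOfList_nodup (xs : List String) (h : xs.Nodup) : PySem.Set.ofList xs = xs := by
  have gen : ∀ (ys acc : List String), ys.Nodup → (∀ y ∈ ys, y ∉ acc) →
      ys.foldl PySem.Set.add acc = acc ++ ys := by
    intro ys
    induction ys with
    | nil => intro acc _ _; simp
    | cons y rest ih =>
      intro acc hnd hdisj
      simp only [List.nodup_cons] at hnd
      have hmem : y ∉ acc := hdisj y (by simp)
      have hadd : PySem.Set.add acc y = acc ++ [y] := by
        simp [PySem.Set.add, List.contains_eq_mem, hmem]
      rw [List.foldl_cons, hadd]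
      rw [ih (acc ++ [y])
        hnd.2
        (by
          intro q hq
          simp only [List.mem_append, List.mem_singleton]
          rintro (hc | hc)
          · exact hdisj q (List.mem_cons_of_mem _ hq) hc
          · exact hnd.1 (hc ▸ hq))]
      simp
  simpa using gen xs [] h (by simp)

-- ===== VERDICT (by name: the statement is the Claim_ definition above) =====
theorem find_overloaded_users_spec : Claim_equal_find_overloaded_users := by
  intro events _
  unfold Spec_find_overloaded_users find_overloaded_users find_overloaded_users_alt
  set d := events.foldl (fun d p => d.modify p.1 [] (· ++ [p.2])) PySem.Dict.empty with hd
  have hkeys : d.keys.Nodup := by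
    rw [hd]
    exact PySem.Dict.nodup_keys_foldl_modify_key events (·.1) [] (fun d p => (· ++ [p.2]))
      PySem.Dict.empty PySem.Dict.nodup_keys_empty
  have hitems : (d.items.map (·.1)).Nodup := hkeys
  have hA := pvFoldl_add_eq_filter
    (fun p => pvALoop (PySem.List.sorted p.2 (fun x => x) false)
      (PySem.List.sorted p.2 (fun x => x) false).length 0 0)
    d.items PySem.Set.empty hitems (by intro p _; simp [PySem.Set.empty])
  simp only [] at hA ⊢
  rw [hA]
  have hfilter : d.items.filter
      (fun p => pvALoop (PySem.List.sorted p.2 (fun x => x) false)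
        (PySem.List.sorted p.2 (fun x => x) false).length 0 0)
      = d.items.filter (fun p => pvHasBurst p.2) := by
    apply List.filter_congr
    intro p _
    exact pvPerUser p.2
  rw [hfilter]
  rw [pvOfList_nodup ((d.items.filter (fun p => pvHasBurst p.2)).map (·.1))
    (hitems.sublist (List.Sublist.map (·.1) (List.filter_sublist (l := d.items))))]
  simp [PySem.Set.empty]
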